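-- pv_equiv track=rewrite | github.com/ChanghyunRyu/Python-CodingTest-note | pccp/lonely_alphabet/lonely_alphabet.py | solution
-- ===== SOURCE A (Python) =====
-- def solution(input_string):
--     answer = []
--     before_char = input_string[0]
--     record = { before_char: 1}
--     for i in range(1, len(input_string)):
--         if before_char == input_string[i]:
--             continue
--         else:
--             if input_string[i] in record:
--                 record[input_string[i]] += 1
--             else:
--                 record[input_string[i]] = 1
--             before_char = input_string[i]
--
--     for character in record:
--         if record[character] >= 2:
--             answer.append(character)
--     answer.sort()
--     answer = ''.join(answer)
--     if answer == '':
--         answer = 'N'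
--     return answer
-- ===== SOURCE B (Python) =====
-- def solution(input_string):
--     # A character forms >= 2 non-consecutive groups exactly when its occurrences
--     # are not one contiguous block, i.e. some occurrence lies beyond the window
--     # [first_index, first_index + count)  -- no run traversal needed.
--     answer = ''.join(sorted(
--         c for c in set(input_string)
--         if c in input_string[input_string.index(c) + input_string.count(c):]))
--     return answer if answer else 'N'
-- ===== Notes on version B (the rewrite author's own statement) =====
-- stated objective: faster
-- what changed: B never scans runs or counts groups: for each distinct character it decides non-contiguity by index arithmetic (the character reappears after position index(c)+count(c)), doing the per-character work in C-level str.index/count/slicing instead of A's Python-level loop threading a before_char state and a run-count dict; on the empty string (excluded by Pre_) A raises IndexError while B returns the no-answer marker.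
import Mathlib
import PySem

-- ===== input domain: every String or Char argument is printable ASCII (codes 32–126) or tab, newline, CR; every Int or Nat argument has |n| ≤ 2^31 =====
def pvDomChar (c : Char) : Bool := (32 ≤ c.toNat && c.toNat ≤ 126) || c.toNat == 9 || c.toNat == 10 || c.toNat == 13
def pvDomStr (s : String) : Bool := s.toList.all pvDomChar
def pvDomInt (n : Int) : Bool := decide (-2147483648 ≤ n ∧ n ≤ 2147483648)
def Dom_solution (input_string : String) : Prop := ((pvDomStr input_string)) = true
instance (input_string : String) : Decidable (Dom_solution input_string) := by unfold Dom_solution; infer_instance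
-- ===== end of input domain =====

-- B replaces A's run-scanning loop with per-character index arithmetic: c heads ≥ 2 runs iff c
-- reappears after position index(c)+count(c); equivalence is proved on nonempty strings (A raises on "").

-- ===== PORT A =====
def solution (input_string : String) : String :=
  let cs := input_string.toList
  match cs with
  | [] => ""  -- Python raises IndexError here (input_string[0]); excluded by Pre_solution
  | c0 :: _ =>
    let st :=
      (PySem.List.pyRange 1 (PySem.Str.len input_string) 1).foldl
        (fun (st : PySem.Dict Char Int × Char) i =>
          let c := PySem.List.pyGetD cs i ' '
          if st.2 == c then st
          else
            (if st.1.contains c then st.1.insert c (st.1.getD c 0 + 1)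
             else st.1.insert c 1, c))
        (PySem.Dict.insert PySem.Dict.empty c0 1, c0)
    let record := st.1
    let answer :=
      record.keys.foldl
        (fun acc ch => if 2 ≤ record.getD ch 0 then acc ++ [ch] else acc) []
    let answer := String.mk (PySem.List.sorted answer (fun x => x) false)
    if answer = "" then "N" else answer

-- ===== PORT B =====
-- set(input_string) → PySem.Set.ofList (consumed only via sorted: order-independent);
-- input_string.index(c) for c drawn from set(input_string) is the first-occurrence index = cs.idxOf c
-- (c is always present, so str.index cannot raise); s[k:] with k ≥ 0 → PySem.List.slice from k;
-- 'c in s[k:]' for a single character is membership of the slice.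
def solution_alt (input_string : String) : String :=
  let cs := input_string.toList
  let sel := (PySem.Set.ofList cs).filter
      (fun c => (PySem.List.slice cs (some ((cs.idxOf c : Int) + (cs.count c : Int))) none).contains c)
  let answer := String.mk (PySem.List.sorted sel (fun x => x) false)
  if answer = "" then "N" else answer

-- ===== PRECONDITION & SPEC =====
-- Pre_ excludes only the empty string, on which A raises IndexError (input_string[0]).
def Pre_solution (input_string : String) : Prop := input_string.toList ≠ []
instance (input_string : String) : Decidable (Pre_solution input_string) := by
  unfold Pre_solution; infer_instance
def pvWitness_solution : String := "aabaa"

def Spec_solution (input_string : String) (out : String) : Prop := out = solution_alt input_string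
instance (input_string : String) (out : String) : Decidable (Spec_solution input_string out) := by unfold Spec_solution; infer_instance

-- ===== CLAIM (what is proved, stated in full; the proofs are below) =====
def Claim_equal_solution : Prop := ∀ (input_string : String), Dom_solution input_string → Pre_solution input_string → Spec_solution input_string (solution input_string)

-- ===== LEMMAS AND PROOFS =====

-- proof-side helpers: the loop body of A's scan and, for reasoning, the run-head ("collapse") list

def gA (st : PySem.Dict Char Int × Char) (c : Char) : PySem.Dict Char Int × Char :=
  if st.2 == c then st
  else (if st.1.contains c then st.1.insert c (st.1.getD c 0 + 1)
        else st.1.insert c 1, c)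

def gB (ks : List Char) (c : Char) : List Char :=
  if ks = [] ∨ PySem.List.pyGetD ks (-1) ' ' ≠ c then ks ++ [c] else ks

-- invariant of A's loop: the dict counts occurrences in the run-head list accumulated by gB
theorem loop_inv (l : List Char) :
    ∀ (d : PySem.Dict Char Int) (b : Char) (ks : List Char),
    ks ≠ [] → ks.getLast? = some b → d.keys.Nodup →
    (∀ c, c ∈ d.keys ↔ c ∈ ks) → (∀ c, d.getD c 0 = (ks.count c : Int)) →
    (l.foldl gB ks) ≠ [] ∧
    (l.foldl gB ks).getLast? = some (l.foldl gA (d, b)).2 ∧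
    (l.foldl gA (d, b)).1.keys.Nodup ∧
    (∀ c, c ∈ (l.foldl gA (d, b)).1.keys ↔ c ∈ l.foldl gB ks) ∧
    (∀ c, (l.foldl gA (d, b)).1.getD c 0 = ((l.foldl gB ks).count c : Int)) := by
  induction l with
  | nil => intro d b ks h1 h2 h3 h4 h5; exact ⟨h1, by simpa using h2, h3, h4, h5⟩
  | cons c t ih =>
    intro d b ks h1 h2 h3 h4 h5
    by_cases hc : b = c
    · have hlast : PySem.List.pyGetD ks (-1) ' ' = c := by
        rw [PySem.List.pyGetD_neg_one ks ' ' h1]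
        subst hc
        exact Option.some_injective _ (by rw [← List.getLast?_eq_getLast]; exact h2)
      have hA : gA (d, b) c = (d, b) := by simp [gA, hc]
      have hB : gB ks c = ks := by simp [gB, h1, hlast]
      simp only [List.foldl_cons, hA, hB]
      exact ih d b ks h1 h2 h3 h4 h5
    · have hlast : PySem.List.pyGetD ks (-1) ' ' = b := by
        rw [PySem.List.pyGetD_neg_one ks ' ' h1]
        exact Option.some_injective _ (by rw [← List.getLast?_eq_getLast]; exact h2)
      have hA : gA (d, b) c = (d.insert c (d.getD c 0 + 1), c) := by
        by_cases hk : d.contains c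
        · simp [gA, hc, hk]
        · have h0 : d.getD c 0 = 0 := PySem.Dict.getD_of_not_contains d 0 (by simpa using hk)
          simp [gA, hc, hk, h0]
      have hB : gB ks c = ks ++ [c] := by
        have hcnd : (ks = [] ∨ PySem.List.pyGetD ks (-1) ' ' ≠ c) :=
          Or.inr (by rw [hlast]; exact hc)
        simp [gB, hcnd]
      simp only [List.foldl_cons, hA, hB]
      apply ih
      · simp
      · simp
      · exact PySem.Dict.nodup_keys_insert d c _ h3
      · intro x
        rw [PySem.Dict.mem_keys_insert]
        simp [h4 x, or_comm]
      · intro x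
        rw [PySem.Dict.getD_insert]
        by_cases hx : x = c
        · subst hx; simp [h5 x, List.count_append]
        · simp [hx, h5 x, List.count_append, Ne.symm hx]

-- the run-head ("collapse") list of a string, defined structurally for the proofs
def col : List Char → List Char
  | [] => []
  | a :: t => a :: col (t.dropWhile (· == a))
termination_by l => l.length
decreasing_by exact Nat.lt_succ_of_le (List.length_dropWhile_le _ _)

theorem mem_col (x : Char) (l : List Char) : x ∈ col l ↔ x ∈ l := by
  induction l using col.induct with
  | case1 => simp [col]
  | case2 a t ih =>
    rw [col]
    constructor
    · intro h
      rcases List.mem_cons.1 h with h | h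
      · exact h ▸ List.mem_cons_self
      · exact List.mem_cons_of_mem a ((List.dropWhile_sublist _).mem (ih.1 h))
    · intro h
      rcases List.mem_cons.1 h with h | h
      · exact h ▸ List.mem_cons_self
      · rw [← List.takeWhile_append_dropWhile (p := (· == a)) (l := t)] at h
        rcases List.mem_append.1 h with h | h
        · have : x = a := by simpa using List.mem_takeWhile_imp h
          exact this ▸ List.mem_cons_self
        · exact List.mem_cons_of_mem a (ih.2 h)

theorem mem_drop_le {l : List Char} {k m : Nat} {x : Char} (h : m ≤ k) (hx : x ∈ l.drop k) :
    x ∈ l.drop m := by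
  have e : (l.drop m).drop (k - m) = l.drop k := by rw [List.drop_drop]; congr 1; omega
  exact List.drop_subset _ _ (e ▸ hx)

-- c always reappears at or after position idxOf c + count c - 1 (its last occurrence)
theorem mem_drop_idxOf_count (v : List Char) (c : Char) (h : c ∈ v) :
    c ∈ v.drop (v.idxOf c + v.count c - 1) := by
  induction v with
  | nil => simp at h
  | cons b t ih =>
    by_cases hb : b = c
    · subst hb
      rw [List.idxOf_cons_self, List.count_cons]
      by_cases h0 : t.count b = 0
      · simp [h0]
      · obtain ⟨n, hn⟩ : ∃ n, t.count b = n + 1 := ⟨t.count b - 1, by omega⟩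
        have e : 0 + (t.count b + if b == b then 1 else 0) - 1 = n + 1 := by simp [hn]
        rw [e, List.drop_succ_cons]
        have hc : b ∈ t := List.count_pos_iff.1 (by omega)
        exact mem_drop_le (by omega) (ih hc)
    · have hc : c ∈ t := (List.mem_cons.1 h).resolve_left (fun h2 => hb h2.symm)
      have h1 : 1 ≤ t.count c := List.count_pos_iff.2 hc
      rw [List.idxOf_cons_ne t hb, List.count_cons]
      obtain ⟨m, hm⟩ : ∃ m, t.count c = m + 1 := ⟨t.count c - 1, by omega⟩
      have e : (t.idxOf c).succ + (t.count c + if (b == c) = true then 1 else 0) - 1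
          = (t.idxOf c + m) + 1 := by
        rw [beq_eq_false_iff_ne.2 hb]; simp [hm]; omega
      rw [e, List.drop_succ_cons]
      have e2 : t.idxOf c + t.count c - 1 = t.idxOf c + m := by omega
      exact e2 ▸ ih hc

theorem idxOf_pos_of_head_ne {l : List Char} {c : Char} (h : l ≠ []) (hh : l.head h ≠ c) :
    1 ≤ l.idxOf c := by
  cases l with
  | nil => simp at h
  | cons b t =>
    have : b ≠ c := by simpa using hh
    rw [List.idxOf_cons_ne t this]; omega

-- the crux: c heads ≥ 2 runs of l iff c occurs again past position idxOf c + count c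
theorem col_count_two_iff (l : List Char) (c : Char) :
    2 ≤ (col l).count c ↔ c ∈ l.drop (l.idxOf c + l.count c) := by
  induction l using col.induct with
  | case1 => simp [col]
  | case2 a t ih =>
    have hut : t.takeWhile (· == a) ++ t.dropWhile (· == a) = t :=
      List.takeWhile_append_dropWhile
    set u := t.takeWhile (· == a) with hu
    set t' := t.dropWhile (· == a) with ht'
    have hua : ∀ x ∈ u, x = a := fun x hx => by simpa using List.mem_takeWhile_imp hx
    by_cases hac : a = c
    · subst hac
      have hL : (col (a :: t)).count a = (col t').count a + 1 := by
        rw [col, ← ht']; simp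
      have hcu : u.count a = u.length := List.count_eq_length.2 (fun b hb => (hua b hb).symm ▸ rfl)
      have hcnt : (a :: t).count a = u.length + t'.count a + 1 := by
        rw [List.count_cons, ← hut, List.count_append, hcu]; simp
      have hidx : (a :: t).idxOf a = 0 := List.idxOf_cons_self
      have hdrop : (a :: t).drop (0 + (u.length + t'.count a + 1)) = t'.drop (t'.count a) := by
        have e : a :: t = (a :: u) ++ t' := by rw [← hut, List.cons_append]
        rw [e]
        have e2 : 0 + (u.length + t'.count a + 1) = (a :: u).length + t'.count a := by
          simp [List.length_cons]; omega
        rw [e2, List.drop_length_add_append]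
      rw [hL, hidx, hcnt, hdrop]
      constructor
      · intro h
        have hmem : a ∈ t' := (mem_col a t').1 (List.count_pos_iff.1 (by omega))
        have hne : t' ≠ [] := List.ne_nil_of_mem hmem
        have hhead : t'.head hne ≠ a := by
          have := List.head_dropWhile_not (· == a) (l := t) (by rw [← ht']; exact hne)
          simp only [← ht'] at this ⊢
          simpa using this
        have h1 := idxOf_pos_of_head_ne hne hhead
        have h2 := mem_drop_idxOf_count t' a hmem
        exact mem_drop_le (by have := List.count_pos_iff.2 hmem; omega) h2
      · intro h
        have hmem : a ∈ t' := List.drop_subset _ _ h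
        have : 1 ≤ (col t').count a := List.count_pos_iff.2 ((mem_col a t').2 hmem)
        omega
    · have hL : (col (a :: t)).count c = (col t').count c := by
        rw [col, ← ht', List.count_cons, beq_eq_false_iff_ne.2 hac]; simp
      by_cases hct' : c ∈ t'
      · have hcu : c ∉ u := fun h => hac ((hua c h).symm)
        have hidx : (a :: t).idxOf c = u.length + t'.idxOf c + 1 := by
          rw [List.idxOf_cons_ne t hac, ← hut, List.idxOf_append_of_notMem hcu]
        have hcnt : (a :: t).count c = t'.count c := by
          rw [List.count_cons, ← hut, List.count_append, List.count_eq_zero.2 hcu,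
            beq_eq_false_iff_ne.2 hac]
          simp
        have hdrop : (a :: t).drop ((u.length + t'.idxOf c + 1) + t'.count c)
            = t'.drop (t'.idxOf c + t'.count c) := by
          have e : a :: t = (a :: u) ++ t' := by rw [← hut, List.cons_append]
          rw [e]
          have e2 : (u.length + t'.idxOf c + 1) + t'.count c
              = (a :: u).length + (t'.idxOf c + t'.count c) := by
            simp [List.length_cons]; omega
          rw [e2, List.drop_length_add_append]
        rw [hL, hidx, hcnt, hdrop]
        exact ih
      · have hLf : ¬ 2 ≤ (col (a :: t)).count c := by
          rw [hL]
          have : c ∉ col t' := fun h => hct' ((mem_col c t').1 h)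
          rw [List.count_eq_zero.2 this]; omega
        have hRf : c ∉ (a :: t).drop ((a :: t).idxOf c + (a :: t).count c) := by
          intro h
          have hmem : c ∈ a :: t := List.drop_subset _ _ h
          rcases List.mem_cons.1 hmem with h2 | h2
          · exact hac h2.symm
          · rw [← hut] at h2
            rcases List.mem_append.1 h2 with h3 | h3
            · exact hac ((hua c h3).symm)
            · exact hct' h3
        exact iff_of_false hLf hRf

-- A's accumulated run-head list is exactly col
theorem foldl_gB_eq (t : List Char) : ∀ (ks : List Char) (p : Char), ks ≠ [] →
    ks.getLast? = some p → t.foldl gB ks = ks ++ col (t.dropWhile (· == p)) := by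
  induction t with
  | nil => intro ks p h1 h2; simp [col]
  | cons a r ih =>
    intro ks p h1 h2
    have hlast : PySem.List.pyGetD ks (-1) ' ' = p := by
      rw [PySem.List.pyGetD_neg_one ks ' ' h1]
      exact Option.some_injective _ (by rw [← List.getLast?_eq_getLast]; exact h2)
    by_cases hap : a = p
    · have hB : gB ks a = ks := by simp [gB, h1, hlast, hap]
      have hdw : (a :: r).dropWhile (· == p) = r.dropWhile (· == p) := by
        simp [List.dropWhile, hap]
      rw [List.foldl_cons, hB, hdw]
      exact ih ks p h1 h2
    · have hB : gB ks a = ks ++ [a] := by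
        have hc2 : (ks = [] ∨ PySem.List.pyGetD ks (-1) ' ' ≠ a) :=
          Or.inr (by rw [hlast]; exact fun h => hap h.symm)
        simp [gB, hc2]
      have hdw : (a :: r).dropWhile (· == p) = a :: r := by
        rw [List.dropWhile_cons, if_neg (by simpa using hap)]
      rw [List.foldl_cons, hB, hdw, col]
      rw [ih (ks ++ [a]) a (by simp) (by simp), List.append_assoc]; rfl

theorem main_eq (s : String) (hp : s.toList ≠ []) : solution s = solution_alt s := by
  obtain ⟨c0, rest, hcs⟩ : ∃ c0 rest, s.toList = c0 :: rest := by
    cases h : s.toList with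
    | nil => exact absurd h hp
    | cons a l => exact ⟨a, l, rfl⟩
  have hinit1 : (PySem.Dict.insert PySem.Dict.empty c0 1 : PySem.Dict Char Int).keys.Nodup :=
    PySem.Dict.nodup_keys_insert _ _ _ PySem.Dict.nodup_keys_empty
  have hinit2 : ∀ c, c ∈ (PySem.Dict.insert PySem.Dict.empty c0 1 : PySem.Dict Char Int).keys ↔ c ∈ [c0] := by
    intro c; rw [PySem.Dict.mem_keys_insert]; simp
  have hinit3 : ∀ c, (PySem.Dict.insert PySem.Dict.empty c0 1 : PySem.Dict Char Int).getD c 0 = (([c0].count c : Nat) : Int) := by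
    intro c; rw [PySem.Dict.getD_insert]
    by_cases h : c = c0
    · simp [h]
    · simp [h, Ne.symm h]
  obtain ⟨hne, hlast, hnd, hmem, hcnt⟩ :=
    loop_inv rest (PySem.Dict.insert PySem.Dict.empty c0 1) c0 [c0] (by simp) (by simp) hinit1 hinit2 hinit3
  set stA := rest.foldl gA (PySem.Dict.insert PySem.Dict.empty c0 1, c0) with hstA
  set ks' := rest.foldl gB [c0] with hks'
  have hkscol : ks' = col (c0 :: rest) := by
    rw [hks', foldl_gB_eq rest [c0] c0 (by simp) (by simp), col]
    rfl
  have hperm :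
      (stA.1.keys.filter (fun ch => decide (2 ≤ stA.1.getD ch 0))).Perm
        ((PySem.Set.ofList (c0 :: rest)).filter
          (fun c => ((c0 :: rest).drop ((c0 :: rest).idxOf c + (c0 :: rest).count c)).contains c)) := by
    rw [List.perm_ext_iff_of_nodup (hnd.filter _) ((PySem.Set.nodup_ofList _).filter _)]
    intro x
    rw [List.mem_filter, List.mem_filter]
    simp only [decide_eq_true_eq, hmem x, hcnt x, PySem.Set.mem_ofList, List.contains_iff_mem,
      hkscol]
    have hiff := col_count_two_iff (c0 :: rest) x
    constructor
    · intro ⟨_, h2⟩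
      have h2' : 2 ≤ (col (c0 :: rest)).count x := by exact_mod_cast h2
      exact ⟨List.drop_subset _ _ (hiff.1 h2'), hiff.1 h2'⟩
    · intro ⟨h1, h2⟩
      refine ⟨(mem_col x _).2 h1, ?_⟩
      exact_mod_cast hiff.2 h2
  have hsorted :
      PySem.List.sorted (stA.1.keys.filter (fun ch => decide (2 ≤ stA.1.getD ch 0))) (fun x => x) false
      = PySem.List.sorted ((PySem.Set.ofList (c0 :: rest)).filter
          (fun c => ((c0 :: rest).drop ((c0 :: rest).idxOf c + (c0 :: rest).count c)).contains c))
          (fun x => x) false :=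
    (PySem.List.sorted_id_eq_sorted_id_iff_perm _ _).mpr hperm
  have hflA := PySem.List.foldl_pyRange_pyGetD (c0 :: rest) ' ' gA
      (PySem.Dict.insert PySem.Dict.empty c0 1, c0) (a := 1) (by norm_num)
  simp only [PySem.List.len, Int.toNat_one, List.drop_one, List.tail_cons] at hflA
  have hslice : ∀ c : Char, PySem.List.slice (c0 :: rest)
      (some (((c0 :: rest).idxOf c : Int) + ((c0 :: rest).count c : Int))) none
      = (c0 :: rest).drop ((c0 :: rest).idxOf c + (c0 :: rest).count c) := by
    intro c
    rw [← Nat.cast_add, PySem.List.slice_from_natCast]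
  simp only [gA] at hflA
  simp only [solution, solution_alt, hcs, PySem.Str.len_eq]
  rw [hflA, ← hstA]
  rw [PySem.List.foldl_append_ite_eq_filter (fun ch => 2 ≤ stA.1.getD ch 0)]
  simp only [hslice]
  rw [List.nil_append, hsorted]

-- ===== VERDICT =====
theorem solution_spec : Claim_equal_solution := by
  intro s _ hp
  exact main_eq s hp
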